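-- pv_equiv track=rewrite | github.com/nikita2206/heating | components/ot/test/run_tests.py | convert_symbols_to_binary_format
-- ===== SOURCE A (Python) =====
-- def convert_symbols_to_binary_format(symbols_str: str) -> str:
--     """
--     Convert log format (H520,L492,...) to binary format (level,dur,level,dur;...)
--
--     Args:
--         symbols_str: "H520,L492,H521,L1002,..."
--
--     Returns:
--         "1,520,0,492;0,1002,1,521;..."
--     """
--     # Parse H/L pairs
--     pairs = []
--     tokens = symbols_str.split(',')
--
--     for token in tokens:
--         token = token.strip()
--         if not token or token == 'L0' or token == 'H0':
--             continue  # Skip trailing zeros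
--
--         if token.startswith('H'):
--             level = 1
--             duration = token[1:]
--         elif token.startswith('L'):
--             level = 0
--             duration = token[1:]
--         else:
--             continue
--
--         try:
--             pairs.append((level, int(duration)))
--         except ValueError:
--             continue
--
--     # Group pairs into symbols (2 parts per symbol)
--     symbols = []
--     for i in range(0, len(pairs), 2):
--         if i + 1 < len(pairs):
--             level0, dur0 = pairs[i]
--             level1, dur1 = pairs[i + 1]
--             symbols.append(f"{level0},{dur0},{level1},{dur1}")
--         elif i < len(pairs):
--             # Odd number - add final with duration1=0
--             level0, dur0 = pairs[i]
--             symbols.append(f"{level0},{dur0},0,0")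
--
--     return ';'.join(symbols)
-- ===== SOURCE B (Python) =====
-- def convert_symbols_to_binary_format(symbols_str: str) -> str:
--     """Single pass over the tokens with a one-pair 'pending' slot: no
--     intermediate pairs list and no index-based grouping loop."""
--     out = []
--     pending = None
--     for token in symbols_str.split(','):
--         token = token.strip()
--         if not token or token in ('L0', 'H0'):
--             continue
--         if token.startswith('H'):
--             level = 1
--         elif token.startswith('L'):
--             level = 0
--         else:
--             continue
--         try:
--             dur = int(token[1:])
--         except ValueError:
--             continue
--         if pending is None:
--             pending = (level, dur)
--         else:
--             l0, d0 = pending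
--             out.append(f"{l0},{d0},{level},{dur}")
--             pending = None
--     if pending is not None:
--         out.append(f"{pending[0]},{pending[1]},0,0")
--     return ';'.join(out)
-- ===== Notes on version B (the rewrite author's own statement) =====
-- stated objective: simpler
-- what changed: The intermediate pairs list and the second index-based grouping loop over range(0,len,2) are replaced by a single pass over the tokens that keeps one pending (level,dur) slot and emits each formatted symbol as soon as its second half arrives.
import Mathlib
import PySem

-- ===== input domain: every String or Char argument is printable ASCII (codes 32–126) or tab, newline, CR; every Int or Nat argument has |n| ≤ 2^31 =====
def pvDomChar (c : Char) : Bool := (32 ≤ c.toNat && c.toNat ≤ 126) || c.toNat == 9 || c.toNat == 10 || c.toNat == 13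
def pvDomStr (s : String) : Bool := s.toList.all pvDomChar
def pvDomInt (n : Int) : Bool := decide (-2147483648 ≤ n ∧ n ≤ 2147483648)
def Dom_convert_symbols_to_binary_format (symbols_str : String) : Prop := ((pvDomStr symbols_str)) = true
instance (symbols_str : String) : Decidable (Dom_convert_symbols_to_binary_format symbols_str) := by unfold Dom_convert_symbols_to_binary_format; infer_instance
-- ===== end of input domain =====

-- B replaces A's two phases (build a pairs list, then group it by an index loop over
-- range(0, len, 2)) with a single pass over the tokens keeping one pending pair ("simpler").


-- ===== PORT A =====
-- f"{l0},{d0},{l1},{d1}" (code points)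
def pvFmtA (l0 d0 l1 d1 : Int) : List Char :=
  PySem.Int.toChars l0 ++ ',' :: PySem.Int.toChars d0 ++ ',' :: PySem.Int.toChars l1 ++ ',' :: PySem.Int.toChars d1

-- the body of A's first loop: parse one token, appending the (level, duration) pair
def pvTokA (pairs : List (Int × Int)) (token : List Char) : List (Int × Int) :=
  let t := PySem.Chars.strip token
  if t = [] ∨ t = ['L', '0'] ∨ t = ['H', '0'] then pairs
  else if PySem.Chars.startswith t ['H'] then
    match PySem.Int.ofChars? (PySem.Chars.slice t (some 1) none) with
    | some d => pairs ++ [((1 : Int), d)]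
    | none => pairs
  else if PySem.Chars.startswith t ['L'] then
    match PySem.Int.ofChars? (PySem.Chars.slice t (some 1) none) with
    | some d => pairs ++ [((0 : Int), d)]
    | none => pairs
  else pairs

-- the body of A's second loop: group pairs[i], pairs[i+1] (i ranges over range(0, len(pairs), 2))
def pvGroupStepA (pairs : List (Int × Int)) (syms : List (List Char)) (i : Int) : List (List Char) :=
  if i + 1 < (pairs.length : Int) then
    let p0 := PySem.List.pyGetD pairs i (0, 0)
    let p1 := PySem.List.pyGetD pairs (i + 1) (0, 0)
    syms ++ [pvFmtA p0.1 p0.2 p1.1 p1.2]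
  else if i < (pairs.length : Int) then
    let p0 := PySem.List.pyGetD pairs i (0, 0)
    syms ++ [PySem.Int.toChars p0.1 ++ ',' :: PySem.Int.toChars p0.2 ++ [',', '0', ',', '0']]
  else syms

def convert_symbols_to_binary_format (symbols_str : String) : String :=
  let tokens := PySem.Chars.splitOn symbols_str.toList [',']
  let pairs := tokens.foldl pvTokA []
  let symbols := (PySem.List.pyRange 0 (pairs.length : Int) 2).foldl (pvGroupStepA pairs) []
  String.ofList (PySem.Chars.join [';'] symbols)

-- ===== PORT B =====
def pvFmtB (l0 d0 l1 d1 : Int) : List Char :=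
  PySem.Int.toChars l0 ++ ',' :: PySem.Int.toChars d0 ++ ',' :: PySem.Int.toChars l1 ++ ',' :: PySem.Int.toChars d1

-- the body of B's single loop: state = (emitted symbols, pending half-symbol)
def pvStepB (st : List (List Char) × Option (Int × Int)) (token : List Char) :
    List (List Char) × Option (Int × Int) :=
  let t := PySem.Chars.strip token
  if t = [] ∨ t = ['L', '0'] ∨ t = ['H', '0'] then st
  else
    let level? : Option Int :=
      if PySem.Chars.startswith t ['H'] then some 1
      else if PySem.Chars.startswith t ['L'] then some 0
      else none
    match level? with
    | none => st
    | some level =>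
      match PySem.Int.ofChars? (PySem.Chars.slice t (some 1) none) with
      | none => st
      | some dur =>
        match st.2 with
        | none => (st.1, some (level, dur))
        | some (l0, d0) => (st.1 ++ [pvFmtB l0 d0 level dur], none)

-- B's trailing `if pending is not None: out.append(f"{l0},{d0},0,0")`
def pvFinishB (st : List (List Char) × Option (Int × Int)) : List (List Char) :=
  match st.2 with
  | none => st.1
  | some (l0, d0) => st.1 ++ [PySem.Int.toChars l0 ++ ',' :: PySem.Int.toChars d0 ++ [',', '0', ',', '0']]

def convert_symbols_to_binary_format_alt (symbols_str : String) : String :=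
  let st := (PySem.Chars.splitOn symbols_str.toList [',']).foldl pvStepB ([], none)
  String.ofList (PySem.Chars.join [';'] (pvFinishB st))

-- ===== PRECONDITION & SPEC =====
def Spec_convert_symbols_to_binary_format (symbols_str : String) (out : String) : Prop := out = convert_symbols_to_binary_format_alt symbols_str
instance (symbols_str : String) (out : String) : Decidable (Spec_convert_symbols_to_binary_format symbols_str out) := by unfold Spec_convert_symbols_to_binary_format; infer_instance

-- ===== CLAIM (what is proved, stated in full; the proofs are below) =====
def Claim_equal_convert_symbols_to_binary_format : Prop := ∀ (symbols_str : String), Dom_convert_symbols_to_binary_format symbols_str → Spec_convert_symbols_to_binary_format symbols_str (convert_symbols_to_binary_format symbols_str)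

-- ===== LEMMAS AND PROOFS =====

-- what both per-token bodies compute: the accepted (level, duration) pair, if any
def pvParse (token : List Char) : Option (Int × Int) :=
  let t := PySem.Chars.strip token
  if t = [] ∨ t = ['L', '0'] ∨ t = ['H', '0'] then none
  else if PySem.Chars.startswith t ['H'] then
    match PySem.Int.ofChars? (PySem.Chars.slice t (some 1) none) with
    | some d => some ((1 : Int), d)
    | none => none
  else if PySem.Chars.startswith t ['L'] then
    match PySem.Int.ofChars? (PySem.Chars.slice t (some 1) none) with
    | some d => some ((0 : Int), d)
    | none => none
  else none

-- the symbols both programs produce from the accepted pairs, two at a time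
def pvPairSyms : List (Int × Int) → List (List Char)
  | [] => []
  | [p] => [PySem.Int.toChars p.1 ++ ',' :: PySem.Int.toChars p.2 ++ [',', '0', ',', '0']]
  | p :: q :: r => pvFmtA p.1 p.2 q.1 q.2 :: pvPairSyms r

-- B's step on an already-parsed pair
def pvStep2 (st : List (List Char) × Option (Int × Int)) (p : Int × Int) :
    List (List Char) × Option (Int × Int) :=
  match st.2 with
  | none => (st.1, some p)
  | some (l0, d0) => (st.1 ++ [pvFmtA l0 d0 p.1 p.2], none)

theorem pvTokA_eq (pairs : List (Int × Int)) (t : List Char) :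
    pvTokA pairs t = match pvParse t with
      | some p => pairs ++ [p]
      | none => pairs := by
  unfold pvTokA pvParse
  dsimp only
  split_ifs <;> simp <;> cases PySem.Int.ofChars? (PySem.List.slice (PySem.Chars.strip t) (some 1) none) <;> rfl

theorem pvPairsA_eq (ts : List (List Char)) (acc : List (Int × Int)) :
    ts.foldl pvTokA acc = acc ++ ts.filterMap pvParse := by
  induction ts generalizing acc with
  | nil => simp
  | cons t ts ih =>
    rw [List.foldl_cons, List.filterMap_cons, pvTokA_eq]
    cases pvParse t <;> simp [ih]

theorem pvStepB_eq (st : List (List Char) × Option (Int × Int)) (t : List Char) :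
    pvStepB st t = match pvParse t with
      | some p => pvStep2 st p
      | none => st := by
  unfold pvStepB pvParse pvStep2
  dsimp only
  split_ifs <;> simp <;> cases PySem.Int.ofChars? (PySem.List.slice (PySem.Chars.strip t) (some 1) none) <;> rfl

theorem pvFoldB_eq (ts : List (List Char)) (st : List (List Char) × Option (Int × Int)) :
    ts.foldl pvStepB st = (ts.filterMap pvParse).foldl pvStep2 st := by
  induction ts generalizing st with
  | nil => rfl
  | cons t ts ih =>
    rw [List.foldl_cons, List.filterMap_cons, pvStepB_eq]
    cases pvParse t <;> simp [ih]

theorem pvFinishB_fold (ps : List (Int × Int)) (out : List (List Char)) :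
    pvFinishB (ps.foldl pvStep2 (out, none)) = out ++ pvPairSyms ps := by
  induction ps using pvPairSyms.induct generalizing out with
  | case1 => simp [pvFinishB, pvPairSyms]
  | case2 p => simp [pvFinishB, pvPairSyms, pvStep2]
  | case3 p q r ih =>
    have : ((p :: q :: r).foldl pvStep2 (out, none)) =
        r.foldl pvStep2 (out ++ [pvFmtA p.1 p.2 q.1 q.2], none) := by
      simp [pvStep2]
    rw [this, ih, pvPairSyms]
    simp

-- range(0, m+2, 2) starts at 0 and the rest is range(0, m, 2) shifted by 2
theorem pvRange02_shift (m : Nat) :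
    PySem.List.pyRange 0 ((m : Int) + 2) 2 = 0 :: (PySem.List.pyRange 0 (m : Int) 2).map (· + 2) := by
  rw [PySem.List.pyRange_of_pos 0 ((m : Int) + 2) (by norm_num),
      PySem.List.pyRange_of_pos 0 (m : Int) (by norm_num)]
  have h1 : (if (0 : Int) < (m : Int) + 2 then (((m : Int) + 2 - 0 + 2 - 1) / 2).toNat else 0)
      = (if (0 : Int) < (m : Int) then (((m : Int) - 0 + 2 - 1) / 2).toNat else 0) + 1 := by
    split_ifs <;> omega
  rw [h1, List.range_succ_eq_map]
  simp only [List.map_cons, List.map_map]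
  refine List.cons_eq_cons.mpr ⟨by norm_num, ?_⟩
  apply List.map_congr_left; intro a _; simp only [Function.comp_apply]; push_cast; ring

theorem pvGroupStepA_shift (p q : Int × Int) (r : List (Int × Int)) (a : List (List Char)) (k : Nat) :
    pvGroupStepA (p :: q :: r) a ((k : Int) + 2) = pvGroupStepA r a (k : Int) := by
  have c1 : ((k : Int) + 2 + 1 < (((p :: q :: r).length : Nat) : Int)) ↔ ((k : Int) + 1 < (r.length : Int)) := by
    simp only [List.length_cons]; push_cast; omega
  have c2 : ((k : Int) + 2 < (((p :: q :: r).length : Nat) : Int)) ↔ ((k : Int) < (r.length : Int)) := by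
    simp only [List.length_cons]; push_cast; omega
  have g2 : PySem.List.pyGetD (p :: q :: r) ((k : Int) + 2 + 1) (0, 0) = PySem.List.pyGetD r ((k : Int) + 1) (0, 0) := by
    rw [show (k : Int) + 2 + 1 = ((k + 3 : Nat) : Int) from by push_cast; ring,
        show (k : Int) + 1 = ((k + 1 : Nat) : Int) from by push_cast; ring,
        PySem.List.pyGetD_natCast, PySem.List.pyGetD_natCast]
    rfl
  have g1 : PySem.List.pyGetD (p :: q :: r) ((k : Int) + 2) (0, 0) = PySem.List.pyGetD r (k : Int) (0, 0) := by
    rw [show (k : Int) + 2 = ((k + 2 : Nat) : Int) from by push_cast; ring,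
        show (k : Int) = ((k : Nat) : Int) from rfl,
        PySem.List.pyGetD_natCast, PySem.List.pyGetD_natCast]
    rfl
  unfold pvGroupStepA
  dsimp only
  by_cases hc1 : (k : Int) + 1 < (r.length : Int)
  · rw [if_pos (c1.mpr hc1), if_pos hc1, g1, g2]
  · rw [if_neg (fun h => hc1 (c1.mp h)), if_neg hc1]
    by_cases hc2 : (k : Int) < (r.length : Int)
    · rw [if_pos (c2.mpr hc2), if_pos hc2, g1]
    · rw [if_neg (fun h => hc2 (c2.mp h)), if_neg hc2]

theorem pvGroupA_eq (ps : List (Int × Int)) (acc : List (List Char)) :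
    (PySem.List.pyRange 0 (ps.length : Int) 2).foldl (pvGroupStepA ps) acc = acc ++ pvPairSyms ps := by
  induction ps using pvPairSyms.induct generalizing acc with
  | case1 =>
    have h : PySem.List.pyRange 0 ((0 : Int)) 2 = [] := by decide
    simp only [List.length_nil, Nat.cast_zero, h]
    simp [pvPairSyms]
  | case2 p =>
    have h : PySem.List.pyRange 0 ((1 : Int)) 2 = [0] := by decide
    have hp0 : PySem.List.pyGetD [p] 0 (0, 0) = p := by
      rw [show (0 : Int) = ((0 : Nat) : Int) from by norm_num, PySem.List.pyGetD_natCast]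
      rfl
    simp only [List.length_singleton, Nat.cast_one, h, List.foldl_cons, List.foldl_nil]
    unfold pvGroupStepA
    rw [if_neg (by norm_num), if_pos (by norm_num), hp0]
    simp [pvPairSyms]
  | case3 p q r ih =>
    have hlen : (((p :: q :: r).length : Nat) : Int) = (r.length : Int) + 2 := by
      simp only [List.length_cons]; push_cast; ring
    have h0 : pvGroupStepA (p :: q :: r) acc 0 = acc ++ [pvFmtA p.1 p.2 q.1 q.2] := by
      have hp0 : PySem.List.pyGetD (p :: q :: r) 0 (0, 0) = p := by
        rw [show (0 : Int) = ((0 : Nat) : Int) from by norm_num, PySem.List.pyGetD_natCast]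
        rfl
      have hp1 : PySem.List.pyGetD (p :: q :: r) (0 + 1) (0, 0) = q := by
        rw [show (0 : Int) + 1 = ((1 : Nat) : Int) from by norm_num, PySem.List.pyGetD_natCast]
        rfl
      unfold pvGroupStepA
      rw [if_pos (by simp only [List.length_cons]; push_cast; omega), hp0, hp1]
    rw [hlen, pvRange02_shift, List.foldl_cons, List.foldl_map, h0]
    rw [PySem.List.foldl_congr_mem _ _ (pvGroupStepA r) _ ?_, ih, pvPairSyms]
    · simp
    · intro a x hx
      have hb := (PySem.List.mem_pyRange_iff_of_pos (by norm_num : (0 : Int) < 2) x).mp hx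
      obtain ⟨k, rfl⟩ : ∃ k : Nat, x = (k : Int) := ⟨x.toNat, by omega⟩
      exact pvGroupStepA_shift p q r a k

-- ===== VERDICT (by name: the statement is the Claim_ definition above) =====
theorem convert_symbols_to_binary_format_spec : Claim_equal_convert_symbols_to_binary_format := by
  intro s _
  unfold Spec_convert_symbols_to_binary_format convert_symbols_to_binary_format convert_symbols_to_binary_format_alt
  dsimp only
  rw [pvPairsA_eq, pvFoldB_eq, pvGroupA_eq, pvFinishB_fold]
  simp
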